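-- pv_equiv track=rewrite | github.com/terciean/soundproofing-calculator | solutions/recommendation_engine.py | _get_affected_surfaces
-- ===== SOURCE A (Python) =====
-- from typing import Dict, List, Optional, Tuple, Any
--
-- VALID_DIRECTIONS = {
--     "north": "walls",
--     "south": "walls",
--     "east": "walls",
--     "west": "walls",
--     "above": "ceiling",
--     "below": "floor"
-- }
--
-- def _get_affected_surfaces(directions: List[str]) -> Dict[str, bool]:
--     """Get which surfaces are affected by noise directions"""
--     affected = {
--         'walls': False,
--         'ceiling': False,
--         'floor': False
--     }
--
--     for direction in directions:
--         surface = VALID_DIRECTIONS.get(direction)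
--         if surface:
--             affected[surface] = True
--
--     return affected
-- ===== SOURCE B (Python) =====
-- VALID_DIRECTIONS = {
--     "north": "walls",
--     "south": "walls",
--     "east": "walls",
--     "west": "walls",
--     "above": "ceiling",
--     "below": "floor"
-- }
--
-- def _get_affected_surfaces(directions):
--     """For each of the three fixed surfaces, scan the directions for one that maps to it."""
--     return {surf: any(VALID_DIRECTIONS.get(d) == surf for d in directions)
--             for surf in ('walls', 'ceiling', 'floor')}
-- ===== Notes on version B (the rewrite author's own statement) =====
-- stated objective: simpler
-- what changed: A seeds a mutable dict and marks surfaces in one pass over the directions; B is a single dict comprehension over the three fixed surfaces, computing each flag with an any() membership scan of the directions.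
import Mathlib
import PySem

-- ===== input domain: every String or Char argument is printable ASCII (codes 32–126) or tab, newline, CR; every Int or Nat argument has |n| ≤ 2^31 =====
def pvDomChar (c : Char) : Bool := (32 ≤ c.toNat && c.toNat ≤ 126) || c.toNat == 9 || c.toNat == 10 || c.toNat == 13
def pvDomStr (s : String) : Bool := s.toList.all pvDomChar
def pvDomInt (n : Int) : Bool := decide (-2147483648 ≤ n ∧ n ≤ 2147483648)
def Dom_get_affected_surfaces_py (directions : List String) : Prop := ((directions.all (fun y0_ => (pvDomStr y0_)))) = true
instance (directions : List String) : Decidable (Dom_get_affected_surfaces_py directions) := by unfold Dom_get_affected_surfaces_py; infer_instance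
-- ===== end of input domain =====

-- ===== PORT A =====
-- B changes the decomposition: A's single marking pass over the directions becomes,
-- in B, one membership scan of the directions per fixed surface (simpler, same cost).
def pvVALID_DIRECTIONS : PySem.Dict String String := PySem.Dict.ofList
  [("north", "walls"), ("south", "walls"), ("east", "walls"), ("west", "walls"),
   ("above", "ceiling"), ("below", "floor")]

def pvStepA (aff : PySem.Dict String Bool) (direction : String) : PySem.Dict String Bool :=
  match pvVALID_DIRECTIONS.get? direction with
  | some surface => if surface ≠ "" then aff.insert surface true else aff   -- `if surface:` truthiness
  | none => aff

def get_affected_surfaces_py (directions : List String) : List (String × Bool) :=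
  (directions.foldl pvStepA
    (PySem.Dict.ofList [("walls", false), ("ceiling", false), ("floor", false)])).items

-- ===== PORT B =====
def get_affected_surfaces_py_alt (directions : List String) : List (String × Bool) :=
  ["walls", "ceiling", "floor"].map
    (fun surf => (surf, directions.any (fun d => pvVALID_DIRECTIONS.get? d == some surf)))

-- ===== PRECONDITION & SPEC =====
def Spec_get_affected_surfaces_py (directions : List String) (out : List (String × Bool)) : Prop := out = get_affected_surfaces_py_alt directions
instance (directions : List String) (out : List (String × Bool)) : Decidable (Spec_get_affected_surfaces_py directions out) := by unfold Spec_get_affected_surfaces_py; infer_instance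

-- ===== CLAIM (what is proved, stated in full; the proofs are below) =====
def Claim_equal_get_affected_surfaces_py : Prop := ∀ (directions : List String), Dom_get_affected_surfaces_py directions → Spec_get_affected_surfaces_py directions (get_affected_surfaces_py directions)

-- ===== LEMMAS AND PROOFS =====
-- One loop step of A preserves the three-key shape of the dict, or-ing in the mark.
theorem pvStepA_eq (w c f : Bool) (d : String) :
    pvStepA (PySem.Dict.mk [("walls", w), ("ceiling", c), ("floor", f)]) d
      = PySem.Dict.mk
          [("walls", w || (pvVALID_DIRECTIONS.get? d == some "walls")),
           ("ceiling", c || (pvVALID_DIRECTIONS.get? d == some "ceiling")),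
           ("floor", f || (pvVALID_DIRECTIONS.get? d == some "floor"))] := by
  by_cases h1 : d = "north"
  · subst h1
    have hg : pvVALID_DIRECTIONS.get? "north" = some "walls" := by decide
    simp [pvStepA, hg, PySem.Dict.insert]
  by_cases h2 : d = "south"
  · subst h2
    have hg : pvVALID_DIRECTIONS.get? "south" = some "walls" := by decide
    simp [pvStepA, hg, PySem.Dict.insert]
  by_cases h3 : d = "east"
  · subst h3
    have hg : pvVALID_DIRECTIONS.get? "east" = some "walls" := by decide
    simp [pvStepA, hg, PySem.Dict.insert]
  by_cases h4 : d = "west"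
  · subst h4
    have hg : pvVALID_DIRECTIONS.get? "west" = some "walls" := by decide
    simp [pvStepA, hg, PySem.Dict.insert]
  by_cases h5 : d = "above"
  · subst h5
    have hg : pvVALID_DIRECTIONS.get? "above" = some "ceiling" := by decide
    simp [pvStepA, hg, PySem.Dict.insert]
  by_cases h6 : d = "below"
  · subst h6
    have hg : pvVALID_DIRECTIONS.get? "below" = some "floor" := by decide
    simp [pvStepA, hg, PySem.Dict.insert]
  have hg : pvVALID_DIRECTIONS.get? d = none := by
    have hi : pvVALID_DIRECTIONS.items =
        [("north", "walls"), ("south", "walls"), ("east", "walls"), ("west", "walls"),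
         ("above", "ceiling"), ("below", "floor")] := by rfl
    have hf : List.find? (fun p => p.1 == d) pvVALID_DIRECTIONS.items = none := by
      rw [List.find?_eq_none]
      intro p hp
      rw [hi] at hp
      fin_cases hp <;> simp only [beq_iff_eq]
      · exact fun h => h1 h.symm
      · exact fun h => h2 h.symm
      · exact fun h => h3 h.symm
      · exact fun h => h4 h.symm
      · exact fun h => h5 h.symm
      · exact fun h => h6 h.symm
    simp [PySem.Dict.get?, hf]
  simp [pvStepA, hg]

theorem pvLoopA (ds : List String) (w c f : Bool) :
    ds.foldl pvStepA (PySem.Dict.mk [("walls", w), ("ceiling", c), ("floor", f)])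
      = PySem.Dict.mk
          [("walls", w || ds.any (fun d => pvVALID_DIRECTIONS.get? d == some "walls")),
           ("ceiling", c || ds.any (fun d => pvVALID_DIRECTIONS.get? d == some "ceiling")),
           ("floor", f || ds.any (fun d => pvVALID_DIRECTIONS.get? d == some "floor"))] := by
  induction ds generalizing w c f with
  | nil => simp
  | cons d ds ih =>
    simp only [List.foldl_cons, pvStepA_eq, ih, List.any_cons, Bool.or_assoc]

-- ===== VERDICT (by name: the statement is the Claim_ definition above) =====
theorem get_affected_surfaces_py_spec : Claim_equal_get_affected_surfaces_py := by
  intro directions _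
  unfold Spec_get_affected_surfaces_py get_affected_surfaces_py get_affected_surfaces_py_alt
  rw [show (PySem.Dict.ofList [("walls", false), ("ceiling", false), ("floor", false)] : PySem.Dict String Bool) = PySem.Dict.mk [("walls", false), ("ceiling", false), ("floor", false)] from rfl]
  rw [pvLoopA]
  simp
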